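-- pv_equiv track=rewrite | github.com/jfblg/Tracktime-UZE | src/models/startlist/startlist_alg.py | order_from_the_middle
-- ===== SOURCE A (Python) =====
-- def order_from_the_middle(data_list):
--     list_length = len(data_list)
--     if list_length % 2 == 0:
--         new_index = get_index_even_count(list_length)
--     else:
--         new_index = get_index_odd_count(list_length)
--
--     new_order_data_list = []
--     for index in new_index:
--         new_order_data_list.append(data_list[index])
--
--     return [data_list[index] for index in new_index]
--
-- def get_index_odd_count(length):
--
--     new_index_list = []
--     x = length - 1
--     for index in range(0, length):
--
--         new_index_list.append(x)
--
--         if x == 0: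
--             x += 1
--         elif x % 2 == 0:
--             x -= 2
--         else:
--             x += 2
--
--     return new_index_list
--
-- def get_index_even_count(length):
--
--     new_index_list = []
--     x = length
--
--     for index in range(0, length):
--
--         if x == 0:
--             x += 1
--         elif x % 2 == 0:
--             x -= 2
--         else:
--             x += 2
--
--         new_index_list.append(x)
--
--     return new_index_list
-- ===== SOURCE B (Python) =====
-- def order_from_the_middle(data_list):
--     evens, odds = [], []
--     for i, x in enumerate(data_list):
--         if i % 2 == 0:
--             evens.append(x)
--         else:
--             odds.append(x)
--     return evens[::-1] + odds
-- ===== Notes on version B (the rewrite author's own statement) =====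
-- stated objective: simpler
-- what changed: Replaces A's stateful parity-toggling counter that generates an index permutation (plus a dead second pass) and then re-indexes the list, with a single enumerate pass that partitions elements by position parity and returns reversed evens followed by odds.
import Mathlib
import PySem

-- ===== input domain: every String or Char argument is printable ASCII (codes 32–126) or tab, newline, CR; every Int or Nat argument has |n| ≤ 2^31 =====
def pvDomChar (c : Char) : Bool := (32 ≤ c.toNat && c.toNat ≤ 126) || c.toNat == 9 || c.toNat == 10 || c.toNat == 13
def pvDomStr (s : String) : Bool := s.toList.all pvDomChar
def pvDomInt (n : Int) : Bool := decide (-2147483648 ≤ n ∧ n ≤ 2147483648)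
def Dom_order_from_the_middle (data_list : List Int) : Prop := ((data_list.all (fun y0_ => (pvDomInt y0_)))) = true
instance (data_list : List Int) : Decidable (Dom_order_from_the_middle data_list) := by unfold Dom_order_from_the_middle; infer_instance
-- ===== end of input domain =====

-- B replaces A's parity-toggling index-permutation generator (and A's dead second pass)
-- with a single pass partitioning elements by position parity; simpler, same O(n) cost.


-- ===== PORT A =====
def get_index_odd_count (length : Int) : List Int :=
  ((PySem.List.pyRange 0 length 1).foldl
    (fun (st : List Int × Int) _ =>
      let x := st.2
      let lst := st.1 ++ [x]
      let x' := if x = 0 then x + 1 else if PySem.Int.mod x 2 = 0 then x - 2 else x + 2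
      (lst, x'))
    ([], length - 1)).1

def get_index_even_count (length : Int) : List Int :=
  ((PySem.List.pyRange 0 length 1).foldl
    (fun (st : List Int × Int) _ =>
      let x := st.2
      let x' := if x = 0 then x + 1 else if PySem.Int.mod x 2 = 0 then x - 2 else x + 2
      (st.1 ++ [x'], x'))
    ([], length)).1

-- the Python also builds `new_order_data_list` by an explicit loop and discards it;
-- that dead pass computes the same list as the returned comprehension below
def order_from_the_middle (data_list : List Int) : List Int :=
  (if PySem.Int.mod (data_list.length : Int) 2 = 0 then get_index_even_count data_list.length
   else get_index_odd_count data_list.length).map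
    (fun index => PySem.List.pyGetD data_list index 0)

-- ===== PORT B =====
def order_from_the_middle_alt (data_list : List Int) : List Int :=
  let st := (PySem.List.enumerate data_list).foldl
    (fun (st : List Int × List Int) ix =>
      if PySem.Int.mod ix.1 2 = 0 then (st.1 ++ [ix.2], st.2) else (st.1, st.2 ++ [ix.2]))
    ([], [])
  ((PySem.List.slice? st.1 none none (-1)).getD []) ++ st.2

-- ===== PRECONDITION & SPEC =====
def Spec_order_from_the_middle (data_list : List Int) (out : List Int) : Prop := out = order_from_the_middle_alt data_list
instance (data_list : List Int) (out : List Int) : Decidable (Spec_order_from_the_middle data_list out) := by unfold Spec_order_from_the_middle; infer_instance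

-- ===== CLAIM (what is proved, stated in full; the proofs are below) =====
def Claim_equal_order_from_the_middle : Prop := ∀ (data_list : List Int), Dom_order_from_the_middle data_list → Spec_order_from_the_middle data_list (order_from_the_middle data_list)

-- ===== LEMMAS AND PROOFS =====

/-- The counter update of A's two index generators. -/
def pvStep (x : Int) : Int :=
  if x = 0 then x + 1 else if PySem.Int.mod x 2 = 0 then x - 2 else x + 2

/-- The value sequence produced by iterating `pvStep`, emitting before stepping. -/
def pvSeq : Int → Nat → List Int
  | _, 0 => []
  | x, k+1 => x :: pvSeq (pvStep x) k

lemma pv_foldA_odd (l : List Int) : ∀ (acc : List Int) (x : Int),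
    (l.foldl
      (fun (st : List Int × Int) _ =>
        let x := st.2
        let lst := st.1 ++ [x]
        let x' := if x = 0 then x + 1 else if PySem.Int.mod x 2 = 0 then x - 2 else x + 2
        (lst, x'))
      (acc, x)).1 = acc ++ pvSeq x l.length := by
  induction l with
  | nil => intro acc x; simp [pvSeq]
  | cons a t ih =>
      intro acc x
      simp only [List.foldl_cons, List.length_cons]
      rw [ih]
      simp [pvSeq, pvStep]

lemma pv_foldA_even (l : List Int) : ∀ (acc : List Int) (x : Int),
    (l.foldl
      (fun (st : List Int × Int) _ =>
        let x := st.2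
        let x' := if x = 0 then x + 1 else if PySem.Int.mod x 2 = 0 then x - 2 else x + 2
        (st.1 ++ [x'], x'))
      (acc, x)).1 = acc ++ pvSeq (pvStep x) l.length := by
  induction l with
  | nil => intro acc x; simp [pvSeq]
  | cons a t ih =>
      intro acc x
      simp only [List.foldl_cons, List.length_cons]
      rw [ih]
      simp [pvSeq, pvStep]

lemma pvStep_zero : pvStep 0 = 1 := by decide

lemma pvStep_even_pos (m : Nat) : pvStep (2 * ((m:Int) + 1)) = 2 * m := by
  unfold pvStep
  rw [PySem.Int.mod_eq_emod_of_pos (by omega)]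
  split_ifs <;> omega

lemma pvStep_odd (a : Nat) : pvStep (2 * (a:Int) + 1) = 2 * a + 3 := by
  unfold pvStep
  rw [PySem.Int.mod_eq_emod_of_pos (by omega)]
  split_ifs <;> omega

lemma pvSeq_up (j : Nat) : ∀ (a : Nat), pvSeq (2 * a + 1) j = (List.range j).map (fun k => ((2 * (a + k) + 1 : Nat) : Int)) := by
  induction j with
  | zero => intro a; simp [pvSeq]
  | succ j ih =>
      intro a
      simp only [pvSeq, pvStep_odd]
      rw [show (2 * (a:Int) + 3) = 2 * ((a + 1 : Nat) : Int) + 1 by omega, ih (a + 1),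
        List.range_succ_eq_map, List.map_cons, List.map_map]
      refine List.cons_eq_cons.mpr ⟨by omega, ?_⟩
      apply List.map_congr_left
      intro k _
      simp only [Function.comp]
      omega

lemma pvSeq_down (m : Nat) : ∀ (j : Nat),
    pvSeq (2 * m) (m + 1 + j) = (List.range (m + 1)).map (fun k => ((2 * (m - k) : Nat) : Int)) ++ pvSeq 1 j := by
  induction m with
  | zero =>
      intro j
      simp only [Nat.cast_zero, mul_zero]
      rw [show 1 + j = j + 1 by omega]
      simp [pvSeq, pvStep_zero, List.range_one]
  | succ m ih =>
      intro j
      rw [show m + 1 + 1 + j = (m + 1 + j) + 1 by omega]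
      simp only [pvSeq]
      have hstep : pvStep (2 * ((m + 1 : Nat) : Int)) = 2 * m := by
        push_cast
        exact pvStep_even_pos m
      rw [hstep, ih j]
      conv_rhs => rw [List.range_succ_eq_map]
      simp only [List.map_cons, List.map_map, List.cons_append]
      refine List.cons_eq_cons.mpr ⟨by omega, ?_⟩
      refine congrArg (· ++ pvSeq 1 j) ?_
      apply List.map_congr_left
      intro k _
      simp only [Function.comp]
      omega

lemma pv_map_range_reverse {α : Type} (f : Nat → α) (n : Nat) :
    ((List.range n).map f).reverse = (List.range n).map (fun k => f (n - 1 - k)) := by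
  apply List.ext_getElem
  · simp
  · intro i h1 h2
    simp only [List.length_map, List.length_range, List.length_reverse] at h1 h2
    rw [List.getElem_reverse]
    simp only [List.getElem_map, List.getElem_range, List.length_map, List.length_range]

-- B's enumerate fold characterised by position parity
lemma pv_foldB (l : List Int) : ∀ (s : Nat) (ev od : List Int),
    ((PySem.List.enumerate l (s : Int)).foldl
      (fun (st : List Int × List Int) ix =>
        if PySem.Int.mod ix.1 2 = 0 then (st.1 ++ [ix.2], st.2) else (st.1, st.2 ++ [ix.2]))
      (ev, od)) =
    if s % 2 = 0 then
      (ev ++ (List.range ((l.length + 1) / 2)).map (fun k => l.getD (2 * k) 0),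
       od ++ (List.range (l.length / 2)).map (fun k => l.getD (2 * k + 1) 0))
    else
      (ev ++ (List.range (l.length / 2)).map (fun k => l.getD (2 * k + 1) 0),
       od ++ (List.range ((l.length + 1) / 2)).map (fun k => l.getD (2 * k) 0)) := by
  induction l with
  | nil =>
      intro s ev od
      simp only [PySem.List.enumerate, List.foldl_nil, List.length_nil]
      split <;> simp
  | cons a t ih =>
      intro s ev od
      rw [PySem.List.enumerate_cons]
      simp only [List.foldl_cons]
      have hmod : PySem.Int.mod ((s : Int)) 2 = ((s % 2 : Nat) : Int) := by
        exact_mod_cast PySem.Int.mod_natCast s 2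
      have hcast : ((s : Int) + 1) = ((s + 1 : Nat) : Int) := by push_cast; ring
      by_cases hs : s % 2 = 0
      · rw [hmod, if_pos (by exact_mod_cast hs), hcast, ih (s + 1),
          if_neg (by omega : ¬ (s + 1) % 2 = 0), if_pos hs]
        simp only [Prod.mk.injEq, List.length_cons, List.append_assoc]
        constructor
        · rw [show (t.length + 1 + 1) / 2 = t.length / 2 + 1 by omega, List.range_succ_eq_map]
          simp only [List.map_cons, List.map_map, List.getD_cons_zero, Nat.mul_zero, List.singleton_append]
          refine congrArg (ev ++ ·) (List.cons_eq_cons.mpr ⟨by simp, ?_⟩)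
          apply List.map_congr_left
          intro k _
          simp only [Function.comp]
          rw [show 2 * (k + 1) = (2 * k + 1) + 1 by omega, List.getD_cons_succ]
        · refine congrArg (od ++ ·) ?_
          apply List.map_congr_left
          intro k _
          rw [List.getD_cons_succ]
      · rw [hmod, if_neg (by exact_mod_cast hs), hcast, ih (s + 1),
          if_pos (by omega : (s + 1) % 2 = 0), if_neg hs]
        simp only [Prod.mk.injEq, List.length_cons, List.append_assoc]
        constructor
        · refine congrArg (ev ++ ·) ?_
          apply List.map_congr_left
          intro k _
          rw [List.getD_cons_succ]
        · rw [show (t.length + 1 + 1) / 2 = t.length / 2 + 1 by omega, List.range_succ_eq_map]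
          simp only [List.map_cons, List.map_map, List.getD_cons_zero, Nat.mul_zero, List.singleton_append]
          refine congrArg (od ++ ·) (List.cons_eq_cons.mpr ⟨by simp, ?_⟩)
          apply List.map_congr_left
          intro k _
          simp only [Function.comp]
          rw [show 2 * (k + 1) = (2 * k + 1) + 1 by omega, List.getD_cons_succ]

lemma pvB_eq (l : List Int) : order_from_the_middle_alt l =
    ((List.range ((l.length + 1) / 2)).map (fun k => l.getD (2 * k) 0)).reverse ++
    (List.range (l.length / 2)).map (fun k => l.getD (2 * k + 1) 0) := by
  unfold order_from_the_middle_alt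
  have h := pv_foldB l 0 [] []
  simp only [Nat.cast_zero, Nat.zero_mod, if_pos] at h
  rw [h]
  simp [PySem.List.slice?_none_none_neg_one]

lemma pvA_eq (l : List Int) : order_from_the_middle l =
    ((List.range ((l.length + 1) / 2)).map (fun k => l.getD (2 * k) 0)).reverse ++
    (List.range (l.length / 2)).map (fun k => l.getD (2 * k + 1) 0) := by
  simp only [order_from_the_middle]
  have hmod : PySem.Int.mod ((l.length : Int)) 2 = ((l.length % 2 : Nat) : Int) := by
    exact_mod_cast PySem.Int.mod_natCast l.length 2
  have hlen : (PySem.List.pyRange 0 (l.length : Int) 1).length = l.length := by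
    simp [PySem.List.length_pyRange_one]
  rcases Nat.even_or_odd l.length with he | ho
  · -- even length
    obtain ⟨m, hm⟩ := he
    have hm2 : l.length = 2 * m := by omega
    rw [hmod, if_pos (by exact_mod_cast (by omega : l.length % 2 = 0))]
    unfold get_index_even_count
    rw [pv_foldA_even, hlen, List.nil_append]
    cases m with
    | zero =>
        have h0 : l.length = 0 := by omega
        simp [h0, pvSeq]
    | succ m' =>
        have hx : ((l.length : Int)) = 2 * ((m' : Int) + 1) := by omega
        rw [hx, pvStep_even_pos m', hm2,
          show 2 * (m' + 1) = m' + 1 + (m' + 1) by omega,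
          pvSeq_down m' (m' + 1),
          show (1 : Int) = 2 * ((0 : Nat) : Int) + 1 by norm_num,
          pvSeq_up (m' + 1) 0, List.map_append, List.map_map, List.map_map]
        rw [show (m' + 1 + (m' + 1) + 1) / 2 = m' + 1 by omega,
          show (m' + 1 + (m' + 1)) / 2 = m' + 1 by omega,
          pv_map_range_reverse]
        refine congrArg₂ (· ++ ·) ?_ ?_
        · apply List.map_congr_left
          intro k hk
          simp only [Function.comp, List.mem_range] at *
          rw [PySem.List.pyGetD_natCast]
          congr 1
        · apply List.map_congr_left
          intro k _
          simp only [Function.comp]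
          rw [PySem.List.pyGetD_natCast]
          congr 1; omega
  · -- odd length
    obtain ⟨m, hm⟩ := ho
    rw [hmod, if_neg (by exact_mod_cast (by omega : ¬ ((l.length % 2 : Nat) : Int) = 0) )]
    unfold get_index_odd_count
    rw [pv_foldA_odd, hlen, List.nil_append]
    have hx : ((l.length : Int)) - 1 = 2 * (m : Int) := by omega
    rw [hx, hm, show 2 * m + 1 = m + 1 + m by omega,
      pvSeq_down m m,
      show (1 : Int) = 2 * ((0 : Nat) : Int) + 1 by norm_num,
      pvSeq_up m 0, List.map_append, List.map_map, List.map_map]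
    rw [show (m + 1 + m + 1) / 2 = m + 1 by omega,
      show (m + 1 + m) / 2 = m by omega,
      pv_map_range_reverse]
    refine congrArg₂ (· ++ ·) ?_ ?_
    · apply List.map_congr_left
      intro k hk
      simp only [Function.comp, List.mem_range] at *
      rw [PySem.List.pyGetD_natCast]
      congr 1
    · apply List.map_congr_left
      intro k _
      simp only [Function.comp]
      rw [PySem.List.pyGetD_natCast]
      congr 1; omega

-- ===== VERDICT (by name: the statement is the Claim_ definition above) =====
theorem order_from_the_middle_spec : Claim_equal_order_from_the_middle := by
  intro l _
  show order_from_the_middle l = order_from_the_middle_alt l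
  rw [pvA_eq, pvB_eq]
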